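-- pv_equiv track=rewrite | github.com/Mistic1989/projects | Python homework/KT/kt2/exam.py | take_partial
-- ===== SOURCE A (Python) =====
-- def take_partial(text: str, leave_count: int, take_count: int) -> str:
--     """
--     Take only part of the string.
--
--     Ignore first leave_count symbols, then use next take_count symbols.
--     Repeat the process until the end of the string.
--
--     The following conditions are met (you don't have to check those):
--     leave_count >= 0
--     take_count >= 0
--     leave_count + take_count > 0
--
--     take_partial("abcdef", 2, 3) => "cde"
--     take_partial("abcdef", 0, 1) => "abcdef"
--     take_partial("abcdef", 1, 0) => ""
--     take_partial("Hello world", 3, 3) => "lo ld"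
--     """
--     result = ""
--     if leave_count == 0:
--         return text
--     if take_count == 0:
--         return ""
--     for letter in range(leave_count, len(text), take_count + leave_count):
--         result += (text[letter:(letter + take_count)])
--     return result
-- ===== SOURCE B (Python) =====
-- def take_partial(text: str, leave_count: int, take_count: int) -> str:
--     period = leave_count + take_count
--     return ''.join(c for i, c in enumerate(text) if i % period >= leave_count)
-- ===== Notes on version B (the rewrite author's own statement) =====
-- stated objective: simpler
-- what changed: Replaces the strided slice-and-concatenate loop with its two special-case guards by a single per-character pass that keeps character i exactly when i % (leave_count + take_count) >= leave_count; …
-- outside the precondition, e.g. on take_partial('abc', 0, 0): A returns 'abc', B raises ZeroDivisionError; on take_partial('abc', -1, 2): A returns 'abbcc', B returns 'abc'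
import Mathlib
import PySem

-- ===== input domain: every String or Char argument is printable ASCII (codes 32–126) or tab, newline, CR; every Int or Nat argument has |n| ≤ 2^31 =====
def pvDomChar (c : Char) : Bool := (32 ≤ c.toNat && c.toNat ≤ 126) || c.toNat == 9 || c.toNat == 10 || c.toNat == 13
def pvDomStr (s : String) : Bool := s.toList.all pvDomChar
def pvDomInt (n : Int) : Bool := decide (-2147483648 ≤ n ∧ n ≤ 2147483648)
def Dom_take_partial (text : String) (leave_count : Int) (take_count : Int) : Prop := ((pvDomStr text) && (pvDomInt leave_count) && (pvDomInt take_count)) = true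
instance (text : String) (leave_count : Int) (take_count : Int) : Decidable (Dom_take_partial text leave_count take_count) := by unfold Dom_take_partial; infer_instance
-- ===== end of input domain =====

-- B replaces A's strided slice-and-concatenate loop (with its two guard branches) by a single
-- per-character modulo filter; objective: simpler.

-- ===== PORT A =====
def take_partial (text : String) (leave_count : Int) (take_count : Int) : String :=
  -- result = ""; the two early returns; then the strided slice loop accumulating result
  if leave_count = 0 then text
  else if take_count = 0 then ""
  else
    String.ofList
      ((PySem.List.pyRange leave_count (PySem.Str.len text) (take_count + leave_count)).foldl
        (fun result letter =>
          result ++ PySem.List.slice text.toList (some letter) (some (letter + take_count))) [])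

-- ===== PORT B =====
def take_partial_alt (text : String) (leave_count : Int) (take_count : Int) : String :=
  String.ofList
    (((PySem.List.enumerate text.toList).filter
        (fun q => decide (leave_count ≤ PySem.Int.mod q.1 (leave_count + take_count)))).map (·.2))

-- ===== PRECONDITION & SPEC =====
-- Pre_ covers the contract A's docstring states callers guarantee (leave_count >= 0,
-- take_count >= 0, leave_count + take_count > 0), negative take_count with positive
-- leave_count (both programs return ""), and the empty string; it excludes leave_count < 0 and
-- the pair (leave_count = 0, take_count < 0) on nonempty text, where A's values are accidents
-- of negative ranges and negative-index slicing, and leave_count + take_count = 0, where B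
-- raises ZeroDivisionError (and A raises ValueError unless leave_count = 0).
def Pre_take_partial (text : String) (leave_count : Int) (take_count : Int) : Prop :=
  (0 ≤ leave_count ∧ leave_count + take_count ≠ 0 ∧ (0 < leave_count ∨ 0 ≤ take_count))
  ∨ (text = "" ∧ (leave_count = 0 ∨ leave_count + take_count ≠ 0))
instance (text : String) (leave_count : Int) (take_count : Int) : Decidable (Pre_take_partial text leave_count take_count) := by unfold Pre_take_partial; infer_instance

def pvWitness_take_partial : String × Int × Int := ("abcdef", 2, 3)

def Spec_take_partial (text : String) (leave_count : Int) (take_count : Int) (out : String) : Prop := out = take_partial_alt text leave_count take_count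
instance (text : String) (leave_count : Int) (take_count : Int) (out : String) : Decidable (Spec_take_partial text leave_count take_count out) := by unfold Spec_take_partial; infer_instance

-- ===== CLAIM (what is proved, stated in full; the proofs are below) =====
def Claim_equal_take_partial : Prop := ∀ (text : String) (leave_count : Int) (take_count : Int), Dom_take_partial text leave_count take_count → Pre_take_partial text leave_count take_count → Spec_take_partial text leave_count take_count (take_partial text leave_count take_count)

-- ===== LEMMAS AND PROOFS =====

-- shift of a positive-step range
theorem pv_pyRange_shift (a b p c : Int) (hp : 0 < p) :
    PySem.List.pyRange (a + c) (b + c) p = (PySem.List.pyRange a b p).map (· + c) := by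
  rw [PySem.List.pyRange_of_pos _ _ hp, PySem.List.pyRange_of_pos _ _ hp, List.map_map]
  have h1 : (b + c - (a + c)) = b - a := by ring
  have h2 : a + c < b + c ↔ a < b := by omega
  rw [h1]
  simp only [h2]
  apply List.map_congr_left
  intro k _
  simp; ring

-- cons form of a positive-step range
theorem pv_pyRange_cons (a b p : Int) (hp : 0 < p) (hab : a < b) :
    PySem.List.pyRange a b p = a :: PySem.List.pyRange (a + p) b p := by
  rw [PySem.List.pyRange_of_pos _ _ hp, PySem.List.pyRange_of_pos _ _ hp]
  by_cases h2 : a + p < b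
  · have hcnt : ((b - a + p - 1) / p).toNat = ((b - (a + p) + p - 1) / p).toNat + 1 := by
      have he : b - a + p - 1 = (b - (a + p) + p - 1) + 1 * p := by ring
      rw [he, Int.add_mul_ediv_right _ _ (by omega)]
      have h0 : 0 ≤ (b - (a + p) + p - 1) / p := Int.ediv_nonneg (by omega) (by omega)
      omega
    simp only [if_pos hab, if_pos h2, hcnt, List.range_succ_eq_map, List.map_cons, List.map_map]
    refine List.cons_eq_cons.mpr ⟨by simp, ?_⟩
    apply List.map_congr_left; intro k _; simp; ring
  · have hq1 : 1 ≤ (b - a + p - 1) / p := by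
      rw [Int.le_ediv_iff_mul_le (by omega)]; omega
    have hq2 : (b - a + p - 1) / p < 2 := by
      rw [Int.ediv_lt_iff_lt_mul (by omega)]; omega
    have hcnt : ((b - a + p - 1) / p).toNat = 1 := by omega
    simp [if_pos hab, if_neg h2, hcnt, List.range_succ]

-- the filtered enumeration is insensitive to shifting the start by the period
theorem pv_filtEnum_shift (l p : Int) (hp : 0 < p) :
    ∀ (cs : List Char) (s : Int),
      ((PySem.List.enumerate cs (s + p)).filter
          (fun q => decide (l ≤ PySem.Int.mod q.1 p))).map (·.2)
      = ((PySem.List.enumerate cs s).filter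
          (fun q => decide (l ≤ PySem.Int.mod q.1 p))).map (·.2) := by
  intro cs
  induction cs with
  | nil => intro s; simp [PySem.List.enumerate_nil]
  | cons x xs ih =>
    intro s
    rw [PySem.List.enumerate_cons, PySem.List.enumerate_cons]
    have hmod : PySem.Int.mod (s + p) p = PySem.Int.mod s p := by
      rw [PySem.Int.mod_eq_emod_of_pos hp, PySem.Int.mod_eq_emod_of_pos hp,
        show s + p = s + p * 1 by ring, Int.add_mul_emod_self_left]
    have hsh : s + p + 1 = (s + 1) + p := by ring
    by_cases hc : l ≤ PySem.Int.mod s p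
    · simp [hmod, hsh, decide_eq_true hc, ih (s + 1)]
    · simp [hmod, hsh, decide_eq_false hc, ih (s + 1)]

-- within one period-chunk starting at s, the filter keeps exactly the suffix from index l
theorem pv_chunk (l p : Int) (hp : 0 < p) :
    ∀ (cs : List Char) (s : Int), 0 ≤ s → s + cs.length ≤ p →
      ((PySem.List.enumerate cs s).filter
          (fun q => decide (l ≤ PySem.Int.mod q.1 p))).map (·.2)
      = cs.drop (l - s).toNat := by
  intro cs
  induction cs with
  | nil => intro s _ _; simp [PySem.List.enumerate_nil]
  | cons x xs ih =>
    intro s hs hlen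
    rw [PySem.List.enumerate_cons]
    have hslt : s < p := by
      have : ((x :: xs).length : Int) = (xs.length : Int) + 1 := by push_cast [List.length_cons]; ring
      omega
    have hmod : PySem.Int.mod s p = s := by
      rw [PySem.Int.mod_eq_emod_of_pos hp, Int.emod_eq_of_lt hs hslt]
    have hrec := ih (s + 1) (by omega) (by
      have : ((x :: xs).length : Int) = (xs.length : Int) + 1 := by push_cast [List.length_cons]; ring
      omega)
    by_cases hls : l ≤ s
    · have h0 : (l - s).toNat = 0 := by omega
      have h0' : (l - (s + 1)).toNat = 0 := by omega
      rw [h0'] at hrec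
      simp [hmod, decide_eq_true hls, h0, hrec]
    · have h1 : (l - s).toNat = (l - (s + 1)).toNat + 1 := by omega
      simp [hmod, decide_eq_false hls, hrec, h1]

-- main: A's flatMap of slices equals B's modulo filter (l ≥ 1, t ≥ 1)
theorem pv_main (l t : Int) (hl : 1 ≤ l) (ht : 1 ≤ t) :
    ∀ (cs : List Char),
      (PySem.List.pyRange l cs.length (t + l)).flatMap
          (fun i => PySem.List.slice cs (some i) (some (i + t)))
      = ((PySem.List.enumerate cs 0).filter
          (fun q => decide (l ≤ PySem.Int.mod q.1 (l + t)))).map (·.2) := by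
  intro cs
  generalize hn : cs.length = n
  induction n using Nat.strong_induction_on generalizing cs with
  | _ n ih =>
  subst hn
  set p : Int := l + t with hpdef
  have hp : 0 < p := by omega
  have htl : t + l = p := by omega
  by_cases hsmall : (cs.length : Int) ≤ p
  · -- single chunk
    have hrhs := pv_chunk l p hp cs 0 le_rfl (by omega)
    simp only [sub_zero] at hrhs
    rw [htl, hrhs]
    by_cases hln : l < (cs.length : Int)
    · rw [pv_pyRange_cons _ _ _ hp hln,
        PySem.List.pyRange_of_pos _ _ hp, if_neg (by omega), List.range_zero, List.map_nil]
      simp only [List.flatMap_cons, List.flatMap_nil, List.append_nil]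
      have hcast : (l.toNat : Int) = l := by omega
      have := PySem.List.slice_natCast_add cs l.toNat t.toNat
      rw [hcast] at this
      have hcast2 : ((t.toNat : Int)) = t := by omega
      rw [hcast2] at this
      rw [this]
      apply List.take_of_length_le
      simp; omega
    · rw [PySem.List.pyRange_of_pos _ _ hp, if_neg (by omega), List.range_zero, List.map_nil,
        List.flatMap_nil, List.drop_of_length_le (by omega)]
  · -- peel one period-chunk of length p
    rw [not_le] at hsmall
    set k : Nat := p.toNat with hk
    have hkp : (k : Int) = p := by omega
    have hsplit : cs = cs.take k ++ cs.drop k := (List.take_append_drop k cs).symm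
    have hlenTake : (cs.take k).length = k := by
      rw [List.length_take]; omega
    have hlendrop : (cs.drop k).length = cs.length - k := by simp
    have hln : l < (cs.length : Int) := by omega
    rw [htl, pv_pyRange_cons _ _ _ hp (by omega), List.flatMap_cons]
    -- the remaining indices are a shifted range over the dropped suffix
    have hshift : PySem.List.pyRange (l + p) (cs.length : Int) p
        = (PySem.List.pyRange l ((cs.drop k).length : Int) p).map (· + p) := by
      have : ((cs.length : Int)) = ((cs.drop k).length : Int) + p := by
        rw [hlendrop]; omega
      rw [this, ← pv_pyRange_shift l _ p p hp]
    rw [hshift, List.flatMap_map]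
    -- each shifted slice reads from the dropped suffix
    have hslice : ∀ i ∈ PySem.List.pyRange l ((cs.drop k).length : Int) p,
        PySem.List.slice cs (some (i + p)) (some (i + p + t))
        = PySem.List.slice (cs.drop k) (some i) (some (i + t)) := by
      intro i hi
      have hi0 : 0 ≤ i := by
        have := (PySem.List.mem_pyRange_iff_of_pos hp i).mp hi
        omega
      have e1 : i + p = ((i.toNat + k : Nat) : Int) := by push_cast; omega
      have e2 : i + p + t = ((i.toNat + k + t.toNat : Nat) : Int) := by push_cast; omega
      have e3 : i = ((i.toNat : Nat) : Int) := by omega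
      have e4 : i + t = ((i.toNat + t.toNat : Nat) : Int) := by push_cast; omega
      rw [e2, e1, PySem.List.slice_natCast]
      conv_rhs => rw [e4, e3]
      rw [PySem.List.slice_natCast, List.drop_drop]
      congr 1
      · omega
      · congr 1
        omega
    rw [List.flatMap_congr hslice]
    have hrec := ih (cs.drop k).length (by simp; omega) (cs.drop k) rfl
    rw [htl] at hrec
    rw [hrec]
    -- now the RHS: split the enumeration at k
    conv_rhs => rw [hsplit]
    rw [PySem.List.enumerate_append, List.filter_append, List.map_append]
    have hstart : (0 : Int) + ((cs.take k).length : Int) = 0 + p := by rw [hlenTake]; omega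
    rw [hstart, pv_filtEnum_shift l p hp (cs.drop k) 0]
    congr 1
    -- head chunk: filter keeps drop l, which is the first slice
    rw [pv_chunk l p hp (cs.take k) 0 le_rfl (by rw [hlenTake]; omega)]
    have hcast : (l.toNat : Int) = l := by omega
    have hslice0 := PySem.List.slice_natCast_add cs l.toNat t.toNat
    rw [hcast, (by omega : ((t.toNat : Nat) : Int) = t)] at hslice0
    rw [hslice0]
    simp only [sub_zero, List.drop_take]
    have : t.toNat = k - l.toNat := by omega
    rw [this]
  
-- a slice whose clamped stop is at or below its clamped start is empty
theorem pv_slice_nil (xs : List Char) (a b : Int)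
    (h : PySem.List.clampIdx xs.length b ≤ PySem.List.clampIdx xs.length a) :
    PySem.List.slice xs (some a) (some b) = [] := by
  apply List.eq_nil_of_length_eq_zero
  rw [PySem.List.length_slice]
  omega

-- bounds of membership in a negative-step range
theorem pv_mem_pyRange_neg {a b s x : Int} (hs : s < 0)
    (hx : x ∈ PySem.List.pyRange a b s) : b < x ∧ x ≤ a := by
  simp only [PySem.List.pyRange, if_neg (by omega : ¬ s = 0), if_neg (by omega : ¬ 0 < s),
    List.mem_map, List.mem_range] at hx
  obtain ⟨k, hk, he⟩ := hx
  by_cases hba : b < a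
  · rw [if_pos hba] at hk
    have hq := Int.ediv_mul_le (a - b + -s - 1) (b := -s) (by omega)
    have hks : (k : Int) ≤ (a - b + -s - 1) / -s - 1 := by omega
    have hmul : (k : Int) * (-s) ≤ ((a - b + -s - 1) / -s - 1) * (-s) := by
      apply mul_le_mul_of_nonneg_right hks (by omega)
    constructor
    · have : (k : Int) * (-s) ≤ a - b - 1 := by nlinarith
      have hxk : x = a + s * k := he.symm
      nlinarith
    · have hxk : x = a + s * k := he.symm
      nlinarith
  · rw [if_neg hba] at hk
    omega

-- with take_count < 0 (and leave_count ≥ 1) both programs return ""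
theorem pv_neg_take (text : String) (l t : Int) (hl : 1 ≤ l) (ht : t < 0) (hp : l + t ≠ 0) :
    take_partial text l t = take_partial_alt text l t := by
  unfold take_partial take_partial_alt
  rw [if_neg (by omega), if_neg (by omega)]
  have hA : (PySem.List.pyRange l (PySem.Str.len text) (t + l)).foldl
      (fun result letter =>
        result ++ PySem.List.slice text.toList (some letter) (some (letter + t))) [] = [] := by
    rw [PySem.List.foldl_append_eq_flatMap, List.nil_append, List.flatMap_eq_nil_iff]
    intro i hi
    apply pv_slice_nil
    by_cases hs : 0 < t + l
    · -- positive step: l ≤ i, and 0 < i + t ≤ i, so both clamps are mins of nonnegatives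
      have hmem := (PySem.List.mem_pyRange_iff_of_pos hs i).mp hi
      simp only [PySem.List.clampIdx]
      split_ifs <;> omega
    · -- negative step: every index exceeds len(text), and i + t < 0
      have hmem := pv_mem_pyRange_neg (by omega : t + l < 0) hi
      rw [show PySem.Str.len text = (text.toList.length : Int) by simp [PySem.Str.len_eq]] at hmem
      have h1 : PySem.List.clampIdx text.toList.length i = text.toList.length := by
        simp only [PySem.List.clampIdx]
        split_ifs <;> omega
      rw [h1]
      exact PySem.List.clampIdx_le _ _
  have hB : ((PySem.List.enumerate text.toList).filter
      (fun q => decide (l ≤ PySem.Int.mod q.1 (l + t)))) = [] := by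
    apply List.filter_eq_nil_iff.mpr
    intro q _
    by_cases hpp : 0 < l + t
    · have := PySem.Int.mod_lt q.1 hpp
      simp only [decide_eq_true_eq, not_le]
      omega
    · have := PySem.Int.mod_neg_bounds q.1 (b := l + t) (by omega)
      simp only [decide_eq_true_eq, not_le]
      omega
  rw [hA, hB]
  rfl

-- on the empty string both programs return ""
theorem pv_empty (l t : Int) : take_partial "" l t = take_partial_alt "" l t := by
  unfold take_partial take_partial_alt
  have h : ("" : String).toList = [] := rfl
  rw [h]
  by_cases hl0 : l = 0
  · rw [if_pos hl0]
    rfl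
  · rw [if_neg hl0]
    by_cases ht0 : t = 0
    · rw [if_pos ht0]
      rfl
    · rw [if_neg ht0]
      have hA : (PySem.List.pyRange l (PySem.Str.len "") (t + l)).foldl
          (fun result letter =>
            result ++ PySem.List.slice ([] : List Char) (some letter) (some (letter + t))) []
          = ([] : List Char) := by
        rw [PySem.List.foldl_append_eq_flatMap, List.nil_append, List.flatMap_eq_nil_iff]
        intro i _
        apply pv_slice_nil
        simp only [PySem.List.clampIdx, List.length_nil]
        split_ifs <;> omega
      rw [hA]
      rfl

-- ===== VERDICT (by name: the statement is the Claim_ definition above) =====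
theorem take_partial_spec : Claim_equal_take_partial := by
  intro text l t _ hpre
  unfold Spec_take_partial
  rcases hpre with ⟨hl, hp, hlt⟩ | ⟨hempty, _⟩
  swap
  · subst hempty
    exact pv_empty l t
  by_cases htneg : t < 0
  · exact pv_neg_take text l t (by omega) htneg hp
  have ht : 0 ≤ t := by omega
  have hp : 0 < l + t := by omega
  unfold take_partial take_partial_alt
  by_cases hl0 : l = 0
  · subst hl0
    rw [if_pos rfl]
    have : ((PySem.List.enumerate text.toList).filter
        (fun q => decide ((0:Int) ≤ PySem.Int.mod q.1 (0 + t)))) =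
        PySem.List.enumerate text.toList := by
      apply List.filter_eq_self.mpr
      intro q _
      exact decide_eq_true (PySem.Int.mod_nonneg _ (by omega))
    rw [this, PySem.List.map_snd_enumerate, String.ofList_toList]
  · by_cases ht0 : t = 0
    · subst ht0
      rw [if_neg hl0, if_pos rfl]
      have : ((PySem.List.enumerate text.toList).filter
          (fun q => decide (l ≤ PySem.Int.mod q.1 (l + 0)))) = [] := by
        apply List.filter_eq_nil_iff.mpr
        intro q _
        have := PySem.Int.mod_lt q.1 (b := l + 0) (by omega)
        simp only [decide_eq_true_eq, not_le]
        omega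
      rw [this]; rfl
    · simp only [if_neg hl0, if_neg ht0]
      rw [PySem.List.foldl_append_eq_flatMap, List.nil_append]
      congr 1
      have hlen : PySem.Str.len text = (text.toList.length : Int) := by
        simp [PySem.Str.len_eq]
      rw [hlen]
      exact pv_main l t (by omega) (by omega) text.toList
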